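-- pv_equiv track=rewrite | github.com/protomaps/PMTiles | python/pmtiles/tile.py | tileid_to_zxy
-- ===== SOURCE A (Python) =====
-- def rotate(n, xy, rx, ry):
--     if ry == 0:
--         if rx == 1:
--             xy[0] = n - 1 - xy[0]
--             xy[1] = n - 1 - xy[1]
--         xy[0], xy[1] = xy[1], xy[0]
--
-- def t_on_level(z, pos):
--     n = 1 << z
--     rx, ry, t = pos, pos, pos
--     xy = [0, 0]
--     s = 1
--     while s < n:
--         rx = 1 & (t // 2)
--         ry = 1 & (t ^ rx)
--         rotate(s, xy, rx, ry)
--         xy[0] += s * rx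
--         xy[1] += s * ry
--         t //= 4
--         s *= 2
--     return z, xy[0], xy[1]
--
-- def tileid_to_zxy(tile_id):
--     num_tiles = 0
--     acc = 0
--     for z in range(0,32):
--         num_tiles = (1 << z) * (1 << z)
--         if acc + num_tiles > tile_id:
--             return t_on_level(z, tile_id - acc)
--         acc += num_tiles
--     raise OverflowError("tile zoom exceeds 64-bit limit")
-- ===== SOURCE B (Python) =====
-- # Table-driven MSB-first Hilbert decode: closed-form zoom, then a 4-state finite
-- # state machine that walks the base-4 digits of the offset from most significant
-- # to least, emitting one x-bit and one y-bit per digit.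
--
-- _RX = ((0, 0, 1, 1), (0, 1, 1, 0), (1, 0, 0, 1), (1, 1, 0, 0))
-- _RY = ((0, 1, 1, 0), (0, 0, 1, 1), (1, 1, 0, 0), (1, 0, 0, 1))
-- _NXT = ((1, 0, 0, 2), (0, 1, 1, 3), (3, 2, 2, 0), (2, 3, 3, 1))
--
-- def tileid_to_zxy(tile_id):
--     # tiles below zoom z number (4**z - 1)//3, so 4**z <= 3*tile_id + 1 < 4**(z+1)
--     z = ((3 * tile_id + 1).bit_length() - 1) // 2 if tile_id > 0 else 0
--     t = tile_id - (4 ** z - 1) // 3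
--     x = y = 0
--     state = 0
--     for i in reversed(range(z)):
--         q = (t >> (2 * i)) & 3
--         x = 2 * x + _RX[state][q]
--         y = 2 * y + _RY[state][q]
--         state = _NXT[state][q]
--     return z, x, y
-- ===== Notes on version B (the rewrite author's own statement) =====
-- stated objective: alternative
-- what changed: B computes the zoom in closed form from bit_length of 3*tile_id+1 instead of A's 32-step accumulation search, and decodes the Hilbert offset with a table-driven 4-state finite state machine that walks the base-4 digits from most significant to least, emitting one x-bit and one y-bit per digit, instead of A's least-significant-first loop that repeatedly rotates/reflects the accumulated coordinates.
import Mathlib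
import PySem

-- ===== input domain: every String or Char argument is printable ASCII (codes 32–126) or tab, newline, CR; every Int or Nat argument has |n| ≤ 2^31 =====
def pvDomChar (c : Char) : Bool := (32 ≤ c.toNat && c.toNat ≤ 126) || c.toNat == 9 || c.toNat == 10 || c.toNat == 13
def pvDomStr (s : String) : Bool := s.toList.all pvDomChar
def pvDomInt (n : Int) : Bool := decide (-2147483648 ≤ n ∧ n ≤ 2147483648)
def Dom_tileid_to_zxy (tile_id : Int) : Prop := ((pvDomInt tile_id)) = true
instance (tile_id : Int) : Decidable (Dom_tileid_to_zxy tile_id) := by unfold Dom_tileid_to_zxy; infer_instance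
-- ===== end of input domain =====

-- B replaces A's 32-step zoom-search loop by a closed-form bit_length zoom, and replaces A's
-- LSB-first rotate/reflect Hilbert loop by a table-driven 4-state FSM over the base-4 digits,
-- MSB first, emitting one x-bit and one y-bit per digit (objective: alternative).

-- ===== PORT A =====
def rotate (n : Int) (xy : Int × Int) (rx ry : Int) : Int × Int :=
  if ry = 0 then
    let xy := if rx = 1 then (n - 1 - xy.1, n - 1 - xy.2) else xy
    (xy.2, xy.1)
  else xy

-- the 'while s < n' loop of t_on_level; fuel only makes the while total (s doubles from 1 and
-- n = 2^z with z < 32 at every call site, so at most 31 iterations — fuel 64 is never exhausted)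
def tLevelLoop (fuel : Nat) (n rx ry t : Int) (xy : Int × Int) (s : Int) : Int × Int :=
  match fuel with
  | 0 => xy
  | fuel + 1 =>
    if s < n then
      let rx := PySem.Int.band 1 (PySem.Int.floordiv t 2)
      let ry := PySem.Int.band 1 (PySem.Int.bxor t rx)
      let xy := rotate s xy rx ry
      let xy := (xy.1 + s * rx, xy.2 + s * ry)
      tLevelLoop fuel n rx ry (PySem.Int.floordiv t 4) xy (s * 2)
    else xy

def t_on_level (z pos : Int) : Int × Int × Int :=
  let n := (1 : Int) <<< z.toNat   -- 1 << z; z comes from range(0,32), so z ≥ 0 and toNat is exact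
  let xy := tLevelLoop 64 n pos pos pos (0, 0) 1
  (z, xy.1, xy.2)

-- the 'for z in range(0,32)' loop of tileid_to_zxy (early return ⇒ recursion over the range list);
-- Python raises OverflowError when the range is exhausted, which for |tile_id| ≤ 2^31 never happens
def zoomSearch (tile_id : Int) (acc : Int) : List Int → Int × Int × Int
  | [] => (0, 0, 0)   -- raise OverflowError: unreachable on the stated domain
  | z :: zs =>
    let num := ((1 : Int) <<< z.toNat) * ((1 : Int) <<< z.toNat)   -- (1 << z) * (1 << z), z ≥ 0
    if acc + num > tile_id then t_on_level z (tile_id - acc)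
    else zoomSearch tile_id (acc + num) zs

def tileid_to_zxy (tile_id : Int) : Int × Int × Int :=
  zoomSearch tile_id 0 (PySem.List.pyRange 0 32 1)

-- ===== PORT B =====
-- the tuple tables _RX/_RY/_NXT of Source B, looked up at (state, q): returns (rx, ry, next state)
def hilT (st q : Int) : Int × Int × Int :=
  if st = 0 then (if q = 0 then (0,0,1) else if q = 1 then (0,1,0) else if q = 2 then (1,1,0) else (1,0,2))
  else if st = 1 then (if q = 0 then (0,0,0) else if q = 1 then (1,0,1) else if q = 2 then (1,1,1) else (0,1,3))
  else if st = 2 then (if q = 0 then (1,1,3) else if q = 1 then (0,1,2) else if q = 2 then (0,0,2) else (1,0,0))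
  else (if q = 0 then (1,1,2) else if q = 1 then (1,0,3) else if q = 2 then (0,0,3) else (0,1,1))

-- one iteration of Source B's 'for i in reversed(range(z))' loop, state = (x, y, state)
def fsmStep (t : Int) (acc : Int × Int × Int) (i : Nat) : Int × Int × Int :=
  let q := PySem.Int.band (t >>> (2 * i)) 3
  let e := hilT acc.2.2 q
  (2 * acc.1 + e.1, 2 * acc.2.1 + e.2.1, e.2.2)

def tileid_to_zxy_alt (tile_id : Int) : Int × Int × Int :=
  let z : Nat := if 0 < tile_id then (PySem.Int.bitLength (3 * tile_id + 1) - 1) / 2 else 0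
  let t := tile_id - PySem.Int.floordiv (4 ^ z - 1) 3
  let r := ((List.range z).reverse).foldl (fsmStep t) (0, 0, 0)
  ((z : Int), r.1, r.2.1)

-- ===== PRECONDITION & SPEC =====
def Spec_tileid_to_zxy (tile_id : Int) (out : Int × Int × Int) : Prop := out = tileid_to_zxy_alt tile_id
instance (tile_id : Int) (out : Int × Int × Int) : Decidable (Spec_tileid_to_zxy tile_id out) := by unfold Spec_tileid_to_zxy; infer_instance

-- ===== CLAIM =====
def Claim_equal_tileid_to_zxy : Prop := ∀ (tile_id : Int), Dom_tileid_to_zxy tile_id → Spec_tileid_to_zxy tile_id (tileid_to_zxy tile_id)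

-- ===== LEMMAS AND PROOFS =====

-- canonical per-digit form of A's loop body (proof-only; neither port uses it)
def altStep (t : Int) (i : Nat) (xy : Int × Int) : Int × Int :=
  let s : Int := (1 : Int) <<< i
  let q := PySem.Int.band (t >>> (2 * i)) 3
  if q = 0 then (xy.2, xy.1)
  else if q = 1 then (xy.1, xy.2 + s)
  else if q = 2 then (xy.1 + s, xy.2 + s)
  else (2 * s - 1 - xy.2, s - 1 - xy.1)

-- canonical Hilbert decode: A's coordinates at level z for offset t
def canonXY (z : Nat) (t : Int) : Int × Int :=
  (List.range z).foldl (fun xy i => altStep t i xy) (0, 0)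

theorem shiftl_one (i : Nat) : ((1:Int) <<< i) = 2 ^ i := by
  rw [Int.shiftLeft_eq]; ring

theorem band_one_left (a : Int) : PySem.Int.band 1 a = PySem.Int.mod a 2 := by
  rw [PySem.Int.band_comm]; exact PySem.Int.band_one a

theorem nat_and_three (n : Nat) : n &&& 3 = n % 4 := by
  have := Nat.and_two_pow_sub_one_eq_mod n 2
  norm_num at this; omega

theorem nat_xor_mod_two (a b : Nat) : (a ^^^ b) % 2 = (a % 2) ^^^ (b % 2) := by
  have h := Nat.and_xor_distrib_right (a := a) (b := b) (c := 1)
  simpa [Nat.and_one_is_mod] using h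

-- digit i of a nonnegative t, as both ports read it
theorem digit_eq (N : Nat) (i : Nat) :
    PySem.Int.band ((N:Int) >>> (2 * i)) 3 = ((N / 4 ^ i % 4 : Nat) : Int) := by
  have h1 : ((N:Int) >>> (2 * i)) = ((N >>> (2 * i) : Nat) : Int) := by
    exact_mod_cast Int.natCast_shiftRight N (2 * i)
  have h2 : N >>> (2 * i) = N / 4 ^ i := by
    rw [Nat.shiftRight_eq_div_pow]
    congr 1
    rw [pow_mul]; norm_num
  rw [h1, h2, show ((3:Int)) = ((3:Nat):Int) by norm_num, PySem.Int.band_natCast,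
    nat_and_three]

-- A's loop body at base-4 digit i of t0 equals altStep, for any 0 ≤ t0
theorem step_eq (t0 : Int) (i : Nat) (xy : Int × Int) (ht : 0 ≤ t0) :
    (let t := PySem.Int.floordiv t0 (4 ^ i)
     let rx := PySem.Int.band 1 (PySem.Int.floordiv t 2)
     let ry := PySem.Int.band 1 (PySem.Int.bxor t rx)
     let xy' := rotate ((1:Int) <<< i) xy rx ry
     (xy'.1 + ((1:Int) <<< i) * rx, xy'.2 + ((1:Int) <<< i) * ry))
    = altStep t0 i xy := by
  lift t0 to ℕ using ht with N
  have h4 : ((4:Int) ^ i) = ((4 ^ i : Nat) : Int) := by push_cast; ring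
  have hm : PySem.Int.floordiv (N:Int) ((4:Int) ^ i) = ((N / 4 ^ i : Nat) : Int) := by
    rw [h4]; exact PySem.Int.floordiv_natCast N (4 ^ i)
  set M := N / 4 ^ i with hM
  have hq : PySem.Int.band ((N:Int) >>> (2 * i)) 3 = ((M % 4 : Nat) : Int) := digit_eq N i
  have hrx : PySem.Int.band 1 (PySem.Int.floordiv ((M:Nat):Int) 2) = ((M / 2 % 2 : Nat) : Int) := by
    rw [band_one_left, PySem.Int.floordiv_eq_ediv_of_pos (by norm_num),
      PySem.Int.mod_eq_emod_of_pos (by norm_num)]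
    omega
  have hry : PySem.Int.band 1 (PySem.Int.bxor ((M:Nat):Int) ((M / 2 % 2 : Nat) : Int))
      = (((M % 2) ^^^ (M / 2 % 2) : Nat) : Int) := by
    rw [band_one_left, PySem.Int.bxor_natCast, PySem.Int.mod_eq_emod_of_pos (by norm_num)]
    rw [show ((M ^^^ M / 2 % 2 : Nat) : Int) % 2 = (((M ^^^ M / 2 % 2) % 2 : Nat) : Int) by omega,
      nat_xor_mod_two, Nat.mod_mod_of_dvd _ (dvd_refl 2)]
  simp only [altStep, hm, hrx, hry, hq]
  have h4' : M % 4 < 4 := Nat.mod_lt _ (by norm_num)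
  have hd2 : M / 2 % 2 = M % 4 / 2 := by omega
  have hm2 : M % 2 = M % 4 % 2 := by omega
  rw [hd2] at hrx ⊢
  rw [hm2]
  interval_cases h : M % 4 <;> simp [rotate] <;> ring_nf

-- A's while-loop, started at s = 2^i with k doublings left, folds altStep over range' i k
theorem tLevelLoop_eq (k : Nat) : ∀ (fuel i : Nat) (rx ry t0 : Int) (xy : Int × Int),
    k ≤ fuel → 0 ≤ t0 →
    tLevelLoop fuel (2 ^ (i + k)) rx ry (PySem.Int.floordiv t0 (4 ^ i)) xy (2 ^ i)
      = (List.range' i k).foldl (fun xy j => altStep t0 j xy) xy := by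
  induction k with
  | zero =>
    intro fuel i rx ry t0 xy _ _
    match fuel with
    | 0 => rfl
    | fuel + 1 =>
      simp only [tLevelLoop, Nat.add_zero, if_neg (lt_irrefl _), List.range', List.foldl]
  | succ k ih =>
    intro fuel i rx ry t0 xy hf ht
    match fuel with
    | fuel + 1 =>
      have hlt : (2:Int) ^ i < 2 ^ (i + (k + 1)) :=
        pow_lt_pow_right₀ (by norm_num) (by omega)
      simp only [tLevelLoop, if_pos hlt]
      have hstep := step_eq t0 i xy ht
      simp only [shiftl_one] at hstep
      rw [show PySem.Int.floordiv (PySem.Int.floordiv t0 (4 ^ i)) 4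
            = PySem.Int.floordiv t0 (4 ^ (i + 1)) by
          rw [PySem.Int.floordiv_eq_ediv_of_pos (b := (4:Int) ^ i) (by positivity),
            PySem.Int.floordiv_eq_ediv_of_pos (by norm_num),
            PySem.Int.floordiv_eq_ediv_of_pos (b := (4:Int) ^ (i+1)) (by positivity),
            Int.ediv_ediv_of_nonneg (by positivity), pow_succ]]
      rw [show (2:Int) ^ i * 2 = 2 ^ (i + 1) by rw [pow_succ]]
      rw [show i + (k + 1) = (i + 1) + k by omega]
      rw [ih fuel (i + 1) _ _ t0 _ (by omega) ht]
      rw [List.range'_succ, List.foldl_cons, hstep]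

theorem t_on_level_eq (z : Nat) (pos : Int) (hz : z ≤ 31) (hp : 0 ≤ pos) :
    t_on_level (z : Int) pos = ((z : Int), (canonXY z pos).1, (canonXY z pos).2) := by
  have h1 : PySem.Int.floordiv pos ((4:Int) ^ 0) = pos := by
    rw [PySem.Int.floordiv_eq_ediv_of_pos (by norm_num)]; simp
  have h := tLevelLoop_eq z 64 0 pos pos pos (0, 0) (by omega) hp
  rw [h1] at h
  simp only [t_on_level, Int.toNat_natCast, shiftl_one, Nat.zero_add, pow_zero] at h ⊢
  rw [h, canonXY, List.range_eq_range']

-- the cumulative tile count below zoom z, as B computes it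
def AccZ (z : Nat) : Int := PySem.Int.floordiv ((4:Int) ^ z - 1) 3

theorem AccZ_eq (z : Nat) : 3 * AccZ z = 4 ^ z - 1 := by
  have hdvd : (3:Int) ∣ 4 ^ z - 1 := by
    induction z with
    | zero => simp
    | succ n ih =>
      have h : (4:Int) ^ (n+1) - 1 = 4 * (4 ^ n - 1) + 3 := by ring
      rw [h]
      exact dvd_add (Dvd.dvd.mul_left ih 4) (dvd_refl 3)
  rw [AccZ, PySem.Int.floordiv_eq_ediv_of_pos (by norm_num), mul_comm,
    Int.ediv_mul_cancel hdvd]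

theorem AccZ_succ (j : Nat) : AccZ j + 4 ^ j = AccZ (j + 1) := by
  have h1 := AccZ_eq j
  have h2 := AccZ_eq (j + 1)
  have h3 : (4:Int) ^ (j+1) = 4 * 4 ^ j := by rw [pow_succ]; ring
  linarith

theorem AccZ_mono {a b : Nat} (h : a ≤ b) : AccZ a ≤ AccZ b := by
  have h1 := AccZ_eq a
  have h2 := AccZ_eq b
  have h3 : (4:Int) ^ a ≤ 4 ^ b := pow_le_pow_right₀ (by norm_num) h
  linarith

-- A's zoom search, entered at zoom j with acc = AccZ j, stops exactly at zstar
theorem zoomSearch_eq (zstar : Nat) (T : Int) (hz : zstar ≤ 31)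
    (h1 : AccZ zstar ≤ T) (h2 : T < AccZ (zstar + 1)) :
    ∀ (j : Nat), j ≤ zstar →
      zoomSearch T (AccZ j) (PySem.List.pyRange (j : Int) 32 1)
        = t_on_level (zstar : Int) (T - AccZ zstar) := by
  suffices key : ∀ (d j : Nat), zstar - j = d → j ≤ zstar →
      zoomSearch T (AccZ j) (PySem.List.pyRange (j : Int) 32 1)
        = t_on_level (zstar : Int) (T - AccZ zstar) by
    intro j hj; exact key (zstar - j) j rfl hj
  intro d
  induction d with
  | zero =>
    intro j hd hj
    have hjz : j = zstar := by omega
    subst hjz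
    rw [PySem.List.pyRange_one_cons (by exact_mod_cast (by omega : j < 32))]
    simp only [zoomSearch, Int.toNat_natCast, shiftl_one]
    rw [if_pos]
    have h22 : (2:Int) ^ j * 2 ^ j = 4 ^ j := by
      rw [← pow_add, show j + j = 2 * j by omega, pow_mul]; norm_num
    linarith [AccZ_succ j]
  | succ d ih =>
    intro j hd hj
    have hjz : j < zstar := by omega
    rw [PySem.List.pyRange_one_cons (by exact_mod_cast (by omega : j < 32))]
    simp only [zoomSearch, Int.toNat_natCast, shiftl_one]
    rw [if_neg, show ((j:Int) + 1) = ((j + 1 : Nat) : Int) by push_cast; ring]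
    · have h22 : (2:Int) ^ j * 2 ^ j = 4 ^ j := by
        rw [← pow_add, show j + j = 2 * j by omega, pow_mul]; norm_num
      rw [h22, AccZ_succ j]
      exact ih (j + 1) (by omega) (by omega)
    · have h22 : (2:Int) ^ j * 2 ^ j = 4 ^ j := by
        rw [← pow_add, show j + j = 2 * j by omega, pow_mul]; norm_num
      have hmono := AccZ_mono (show j + 1 ≤ zstar by omega)
      have hsucc := AccZ_succ j
      simp only [gt_iff_lt, not_lt]
      linarith

-- B's closed-form zoom (4^z ≤ 3T+1 < 4^(z+1) read off bit_length) brackets T between AccZ's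
theorem zstar_bounds (T : Int) (h0 : 0 < T) (hub : T ≤ 2147483648) :
    let z := (PySem.Int.bitLength (3 * T + 1) - 1) / 2
    AccZ z ≤ T ∧ T < AccZ (z + 1) ∧ z ≤ 31 := by
  intro z
  set m : Int := 3 * T + 1 with hm
  have hm0 : m ≠ 0 := by omega
  set bl := PySem.Int.bitLength m with hbl
  have hlow : 2 ^ (bl - 1) ≤ m.natAbs := PySem.Int.two_pow_bitLength_le m hm0
  have hhigh : m.natAbs < 2 ^ bl := PySem.Int.lt_two_pow_bitLength m
  have hmabs : (m.natAbs : Int) = m := Int.natAbs_of_nonneg (by omega)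
  have hzval : z = (bl - 1) / 2 := rfl
  have hz2 : 2 * z ≤ bl - 1 := by omega
  have hbl2 : bl ≤ 2 * z + 2 := by omega
  have h4low : (4:Int) ^ z ≤ m := by
    have h : (4:Nat) ^ z ≤ m.natAbs := by
      calc (4:Nat) ^ z = 2 ^ (2 * z) := by rw [pow_mul]; norm_num
        _ ≤ 2 ^ (bl - 1) := Nat.pow_le_pow_right (by norm_num) hz2
        _ ≤ m.natAbs := hlow
    calc (4:Int) ^ z = ((4 ^ z : Nat) : Int) := by push_cast; ring
      _ ≤ (m.natAbs : Int) := by exact_mod_cast h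
      _ = m := hmabs
  have h4high : m < (4:Int) ^ (z + 1) := by
    have h : m.natAbs < (4:Nat) ^ (z + 1) := by
      calc m.natAbs < 2 ^ bl := hhigh
        _ ≤ 2 ^ (2 * z + 2) := Nat.pow_le_pow_right (by norm_num) hbl2
        _ = 4 ^ (z + 1) := by rw [show 2 * z + 2 = 2 * (z + 1) by ring, pow_mul]; norm_num
    calc m = (m.natAbs : Int) := hmabs.symm
      _ < ((4 ^ (z + 1) : Nat) : Int) := by exact_mod_cast h
      _ = (4:Int) ^ (z + 1) := by push_cast; ring
  have hzle : z ≤ 31 := by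
    by_contra hc
    have h32 : 32 ≤ z := by omega
    have hp : (4:Int) ^ 32 ≤ 4 ^ z := pow_le_pow_right₀ (by norm_num) h32
    have h432 : (4:Int) ^ 32 = 18446744073709551616 := by norm_num
    omega
  refine ⟨?_, ?_, hzle⟩
  · have := AccZ_eq z; linarith
  · have := AccZ_eq (z + 1); linarith

-- the square isometry each FSM state denotes, on the n × n grid
def iso (st : Int) (n : Int) (p : Int × Int) : Int × Int :=
  if st = 0 then p
  else if st = 1 then (p.2, p.1)
  else if st = 2 then (n - 1 - p.2, n - 1 - p.1)
  else (n - 1 - p.1, n - 1 - p.2)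

-- B's MSB-first FSM fold, started in state st, computes iso_st applied to the canonical decode
theorem fsm_eq (z : Nat) : ∀ (t x y st : Int), 0 ≤ t →
    (st = 0 ∨ st = 1 ∨ st = 2 ∨ st = 3) →
    ∃ st', ((List.range z).reverse).foldl (fsmStep t) (x, y, st)
      = (x * 2 ^ z + (iso st (2 ^ z) (canonXY z t)).1,
         y * 2 ^ z + (iso st (2 ^ z) (canonXY z t)).2, st') := by
  induction z with
  | zero =>
    intro t x y st ht hst
    exact ⟨st, by rcases hst with h|h|h|h <;> subst h <;> simp [canonXY, iso]⟩
  | succ z ih =>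
    intro t x y st ht hst
    have hrev : (List.range (z + 1)).reverse = z :: (List.range z).reverse := by
      rw [List.range_succ, List.reverse_append]; rfl
    have hC : canonXY (z + 1) t = altStep t z (canonXY z t) := by
      simp [canonXY, List.range_succ]
    lift t to ℕ using ht with N
    have hq : PySem.Int.band ((N:Int) >>> (2 * z)) 3 = ((N / 4 ^ z % 4 : Nat) : Int) :=
      digit_eq N z
    set M4 := N / 4 ^ z % 4 with hM4
    have hM4lt : M4 < 4 := Nat.mod_lt _ (by norm_num)
    -- one FSM step at index z
    rw [hrev, List.foldl_cons]
    have hstep : fsmStep (N:Int) (x, y, st) z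
        = (2 * x + (hilT st ((M4:Nat):Int)).1, 2 * y + (hilT st ((M4:Nat):Int)).2.1,
           (hilT st ((M4:Nat):Int)).2.2) := by
      simp [fsmStep, hq]
    rw [hstep]
    have hst' : (hilT st ((M4:Nat):Int)).2.2 = 0 ∨ (hilT st ((M4:Nat):Int)).2.2 = 1
        ∨ (hilT st ((M4:Nat):Int)).2.2 = 2 ∨ (hilT st ((M4:Nat):Int)).2.2 = 3 := by
      rcases hst with h|h|h|h <;> subst h <;> interval_cases M4 <;> simp [hilT]
    obtain ⟨st', hfold⟩ := ih (N:Int) _ _ _ (by positivity) hst'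
    refine ⟨st', ?_⟩
    rw [hfold, hC]
    set p := canonXY z (N:Int) with hp
    -- the per-digit transfer identity: 16 cases, each a ring identity
    have hs : ((1:Int) <<< z) = 2 ^ z := shiftl_one z
    have h2 : (2:Int) ^ (z + 1) = 2 * 2 ^ z := by rw [pow_succ]; ring
    rcases hst with h|h|h|h <;> subst h <;> interval_cases M4 <;>
      simp only [altStep, hq, hs, iso, hilT, h2] <;> norm_num [Prod.ext_iff] <;>
      constructor <;> first | trivial | ring
-- ===== VERDICT =====
theorem tileid_to_zxy_spec : Claim_equal_tileid_to_zxy := by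
  intro T hdom
  unfold Spec_tileid_to_zxy
  have hub : -2147483648 ≤ T ∧ T ≤ 2147483648 := by
    simpa [Dom_tileid_to_zxy, pvDomInt, decide_eq_true_iff] using hdom
  by_cases h0 : 0 < T
  · obtain ⟨h1, h2, hz⟩ := zstar_bounds T h0 hub.2
    set z := (PySem.Int.bitLength (3 * T + 1) - 1) / 2 with hzdef
    have h00 : AccZ 0 = 0 := by
      rw [AccZ, PySem.Int.floordiv_eq_ediv_of_pos (by norm_num)]; norm_num
    have hA := zoomSearch_eq z T hz h1 h2 0 (by omega)
    rw [h00, show ((0:Nat):Int) = 0 by norm_num] at hA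
    have hpos : 0 ≤ T - AccZ z := by linarith
    rw [tileid_to_zxy, hA, t_on_level_eq z _ hz hpos]
    obtain ⟨st', hB⟩ := fsm_eq z (T - AccZ z) 0 0 0 hpos (Or.inl rfl)
    simp only [tileid_to_zxy_alt, if_pos h0, ← hzdef]
    rw [show PySem.Int.floordiv (4 ^ z - 1) 3 = AccZ z from rfl, hB]
    simp [iso]
  · have hT : T ≤ 0 := by omega
    rw [tileid_to_zxy, PySem.List.pyRange_one_cons (by norm_num)]
    simp only [zoomSearch, Int.toNat_zero, shiftl_one, pow_zero, mul_one, zero_add]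
    rw [if_pos (by omega : (1:Int) > T)]
    simp [t_on_level, tLevelLoop, tileid_to_zxy_alt, if_neg h0]
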